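-- pv_equiv track=rewrite | github.com/kjingers/Leetcode | Problems/StringCompression/StringCompression.py | _to_output
-- ===== SOURCE A (Python) =====
-- def _to_output(chars, char, index, count):
--     chars[index] = char
--     index += 1
--     if count > 1:
--         for c in str(count):
--             chars[index] = c
--             index += 1
--
--     return index
-- ===== SOURCE B (Python) =====
-- def _to_output(chars, char, index, count):
--     # Render the count arithmetically: compute the final index first,
--     # then peel digits off with divmod and write them back-to-front.
--     chars[index] = char
--     end = index + 1
--     if count > 1:
--         n = count
--         while n:
--             end += 1
--             n //= 10
--         pos, n = end, count
--         while n: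
--             pos -= 1
--             chars[pos] = str(n % 10)
--             n //= 10
--     return end
-- ===== Notes on version B (the rewrite author's own statement) =====
-- stated objective: alternative
-- what changed: B drops str(count) entirely: it computes the final index first by an arithmetic digit-count loop (repeated //10) and then writes the digits obtained by n%10 back-to-front into precomputed positions, instead of A's string conversion with a stateful forward per-character loop; Pre_ excludes exactly the inputs where the writes raise IndexError.
import Mathlib
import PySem

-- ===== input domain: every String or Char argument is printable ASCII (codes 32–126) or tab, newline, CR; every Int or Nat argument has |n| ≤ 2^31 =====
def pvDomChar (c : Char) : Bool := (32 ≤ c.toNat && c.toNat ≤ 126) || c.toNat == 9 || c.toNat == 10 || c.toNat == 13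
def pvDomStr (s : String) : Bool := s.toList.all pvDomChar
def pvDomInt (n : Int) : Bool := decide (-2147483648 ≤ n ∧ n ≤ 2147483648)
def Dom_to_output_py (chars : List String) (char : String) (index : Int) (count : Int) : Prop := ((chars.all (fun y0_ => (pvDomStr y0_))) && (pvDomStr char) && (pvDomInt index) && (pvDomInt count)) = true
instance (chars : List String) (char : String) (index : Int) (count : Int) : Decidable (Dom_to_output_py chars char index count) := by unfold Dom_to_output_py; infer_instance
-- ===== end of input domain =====

-- B renders the count arithmetically (repeated //10), computing the final index first and writing
-- the digits back-to-front, instead of A's str(count) with a forward per-character loop.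
-- Both mutate `chars` in place; the equivalence proved here is about the RETURN value only.

-- ===== PORT A =====
-- Python: chars[index] = char; index += 1; if count > 1: for c in str(count): chars[index] = c; index += 1; return index
def to_output_py (chars : List String) (char : String) (index : Int) (count : Int) : Int :=
  match PySem.List.pySet? chars index char with
  | none => 0  -- IndexError: excluded by Pre_to_output_py
  | some chars1 =>
    let index1 := index + 1
    if count > 1 then
      -- for c in str(count): chars[index] = c; index += 1   (c is a 1-char string)
      match (PySem.Int.toChars count).foldl
          (fun (acc : Option (List String × Int)) (c : Char) =>
            match acc with
            | none => none  -- an earlier write raised IndexError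
            | some (cs, i) =>
              match PySem.List.pySet? cs i (String.ofList [c]) with
              | none => none  -- IndexError: excluded by Pre_to_output_py
              | some cs' => some (cs', i + 1))
          (some (chars1, index1)) with
      | none => 0
      | some (_, i) => i
    else index1

-- ===== PORT B =====
-- while n: end += 1; n //= 10   — number of iterations; exact for the positive n it is called
-- with (B only runs it when count > 1); the `0 < n` guard is the totalizing form of Python's
-- truthiness test `while n:` there.
def pvDigitSteps (n : Int) : Nat :=
  if _h : 0 < n then pvDigitSteps (PySem.Int.floordiv n 10) + 1 else 0
termination_by n.toNat
decreasing_by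
  have h10 : PySem.Int.floordiv n 10 = n / 10 := PySem.Int.floordiv_eq_ediv_of_pos (by norm_num)
  rw [h10]; omega

-- pos, n = end, count; while n: pos -= 1; chars[pos] = str(n % 10); n //= 10
def pvWriteBack (cs : List String) (pos : Int) (n : Int) : Option (List String) :=
  if h : 0 < n then
    match PySem.List.pySet? cs (pos - 1) (PySem.Int.toStr (PySem.Int.mod n 10)) with
    | none => none  -- IndexError: excluded by Pre_to_output_py
    | some cs' => pvWriteBack cs' (pos - 1) (PySem.Int.floordiv n 10)
  else some cs
termination_by n.toNat
decreasing_by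
  have h10 : PySem.Int.floordiv n 10 = n / 10 := PySem.Int.floordiv_eq_ediv_of_pos (by norm_num)
  rw [h10]; omega

def to_output_py_alt (chars : List String) (char : String) (index : Int) (count : Int) : Int :=
  match PySem.List.pySet? chars index char with
  | none => 0  -- IndexError: excluded by Pre_to_output_py
  | some chars1 =>
    let e := index + 1
    if count > 1 then
      let e := e + (pvDigitSteps count : Int)
      match pvWriteBack chars1 e count with
      | none => 0  -- IndexError: excluded by Pre_to_output_py
      | some _ => e
    else e

-- ===== PRECONDITION & SPEC =====
-- Pre_ excludes exactly the inputs where A raises IndexError: every write position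
-- index, index+1, …, index + len(str(count) if count>1 else "") - 1 must be a valid Python index.
def Pre_to_output_py (chars : List String) (char : String) (index : Int) (count : Int) : Prop :=
  -(chars.length : Int) ≤ index ∧
    index + (if count > 1 then ((PySem.Int.toChars count).length : Int) else 0) < (chars.length : Int)
instance (chars : List String) (char : String) (index : Int) (count : Int) : Decidable (Pre_to_output_py chars char index count) := by unfold Pre_to_output_py; infer_instance
def pvWitness_to_output_py : List String × String × Int × Int := (["a", "b", "c"], "x", 0, 12)

def Spec_to_output_py (chars : List String) (char : String) (index : Int) (count : Int) (out : Int) : Prop := out = to_output_py_alt chars char index count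
instance (chars : List String) (char : String) (index : Int) (count : Int) (out : Int) : Decidable (Spec_to_output_py chars char index count out) := by unfold Spec_to_output_py; infer_instance

-- ===== CLAIM (what is proved, stated in full; the proofs are below) =====
def Claim_equal_to_output_py : Prop := ∀ (chars : List String) (char : String) (index : Int) (count : Int), Dom_to_output_py chars char index count → Pre_to_output_py chars char index count → Spec_to_output_py chars char index count (to_output_py chars char index count)

-- ===== LEMMAS AND PROOFS =====

-- pySet? preserves the length of the list.
theorem pySet?_length {α : Type} (l : List α) (i : Int) (v : α) (l' : List α)
    (h : PySem.List.pySet? l i v = some l') : l'.length = l.length := by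
  simp only [PySem.List.pySet?] at h
  cases hk : PySem.List.pyIdx? l.length i with
  | none => simp [hk] at h
  | some k => simp [hk] at h; simp [← h]

-- A's digit loop never hits IndexError and ends with counter i + (number of digits),
-- provided every write position i, …, i + cs.length - 1 is a valid index of l.
theorem digit_loop_snd (cs : List Char) (l : List String) (i : Int)
    (h : ∀ k : Nat, k < cs.length → PySem.Raise.InRange l.length (i + (k : Int))) :
    ∃ l' : List String, l'.length = l.length ∧
      cs.foldl
        (fun (acc : Option (List String × Int)) (c : Char) =>
          match acc with
          | none => none
          | some (cs', j) =>
            match PySem.List.pySet? cs' j (String.ofList [c]) with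
            | none => none
            | some cs'' => some (cs'', j + 1))
        (some (l, i)) = some (l', i + (cs.length : Int)) := by
  induction cs generalizing l i with
  | nil => exact ⟨l, rfl, by simp⟩
  | cons c cs ih =>
      have h0 : PySem.Raise.InRange l.length i := by
        simpa using h 0 (by simp)
      obtain ⟨l1, hl1⟩ : ∃ l1, PySem.List.pySet? l i (String.ofList [c]) = some l1 := by
        cases hs : PySem.List.pySet? l i (String.ofList [c]) with
        | none => exact absurd h0 ((PySem.List.pySet?_eq_none_iff l i _).mp hs)
        | some l1 => exact ⟨l1, rfl⟩
      have hlen := pySet?_length l i _ l1 hl1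
      obtain ⟨l', hl', hfold⟩ := ih l1 (i + 1) (by
        intro k hk
        have := h (k + 1) (by simpa using Nat.succ_lt_succ hk)
        rw [hlen]
        unfold PySem.Raise.InRange at this ⊢
        push_cast at this ⊢
        omega)
      refine ⟨l', hl'.trans hlen, ?_⟩
      simp only [List.foldl_cons, hl1, hfold, List.length_cons]
      congr 2
      push_cast
      ring

-- B's digit-count loop agrees with the length of str(m) for positive m (Nat form).
theorem pvDigitSteps_toDigits (m : Nat) (hm : 0 < m) :
    pvDigitSteps (m : Int) = (Nat.toDigits 10 m).length := by
  induction m using Nat.strong_induction_on with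
  | _ m ih =>
    have hdiv : PySem.Int.floordiv (m : Int) 10 = ((m / 10 : Nat) : Int) := by
      exact_mod_cast PySem.Int.floordiv_natCast m 10
    rw [pvDigitSteps, dif_pos (by exact_mod_cast hm), hdiv]
    by_cases h10 : m < 10
    · rw [Nat.toDigits_of_lt_base h10]
      have : m / 10 = 0 := Nat.div_eq_of_lt h10
      rw [this]
      simp [pvDigitSteps]
    · rw [Nat.toDigits_of_base_le (by norm_num) (by omega)]
      rw [ih (m / 10) (Nat.div_lt_self hm (by norm_num)) (by omega)]
      simp

-- B's digit-count loop agrees with len(str(n)) for n > 1.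
theorem pvDigitSteps_toChars (n : Int) (hn : 1 < n) :
    pvDigitSteps n = (PySem.Int.toChars n).length := by
  have h0 : ¬ n < 0 := by omega
  have ht : n = ((n.toNat : Nat) : Int) := by omega
  rw [PySem.Int.toChars, if_neg h0, ht, pvDigitSteps_toDigits n.toNat (by omega)]
  rw [Int.toNat_natCast]

-- B's back-to-front write loop never hits IndexError when every write position
-- pos - 1, …, pos - pvDigitSteps n is a valid index.
theorem pvWriteBack_isSome (N : Nat) : ∀ (n : Int), n.toNat ≤ N → ∀ (cs : List String) (pos : Int),
    (∀ k : Nat, k < pvDigitSteps n → PySem.Raise.InRange cs.length (pos - 1 - (k : Int))) →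
    ∃ cs', pvWriteBack cs pos n = some cs' := by
  induction N with
  | zero =>
      intro n hN cs pos _
      have hn : ¬ 0 < n := by omega
      exact ⟨cs, by rw [pvWriteBack, dif_neg hn]⟩
  | succ N ih =>
      intro n hN cs pos h
      by_cases hn : 0 < n
      · have hstep : pvDigitSteps n = pvDigitSteps (PySem.Int.floordiv n 10) + 1 := by
          rw [pvDigitSteps, dif_pos hn]
        have h0 : PySem.Raise.InRange cs.length (pos - 1) := by
          have := h 0 (by omega)
          simpa using this
        obtain ⟨cs1, hcs1⟩ : ∃ cs1,
            PySem.List.pySet? cs (pos - 1) (PySem.Int.toStr (PySem.Int.mod n 10)) = some cs1 := by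
          cases hs : PySem.List.pySet? cs (pos - 1) (PySem.Int.toStr (PySem.Int.mod n 10)) with
          | none => exact absurd h0 ((PySem.List.pySet?_eq_none_iff cs (pos - 1) _).mp hs)
          | some cs1 => exact ⟨cs1, rfl⟩
        have hlen := pySet?_length cs (pos - 1) _ cs1 hcs1
        have hdiv : PySem.Int.floordiv n 10 = n / 10 :=
          PySem.Int.floordiv_eq_ediv_of_pos (by norm_num)
        obtain ⟨cs', hcs'⟩ := ih (PySem.Int.floordiv n 10) (by rw [hdiv]; omega) cs1 (pos - 1)
          (by
            intro k hk
            have := h (k + 1) (by omega)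
            rw [hlen]
            unfold PySem.Raise.InRange at this ⊢
            push_cast at this ⊢
            constructor <;> omega)
        exact ⟨cs', by rw [pvWriteBack, dif_pos hn, hcs1]; simpa using hcs'⟩
      · exact ⟨cs, by rw [pvWriteBack, dif_neg hn]⟩

-- ===== VERDICT (by name: the statement is the Claim_ definition above) =====
theorem to_output_py_spec : Claim_equal_to_output_py := by
  intro chars char index count _ hpre
  obtain ⟨hlo, hhi⟩ := hpre
  unfold Spec_to_output_py to_output_py to_output_py_alt
  have h0 : PySem.Raise.InRange chars.length index := by
    constructor
    · exact hlo
    · split_ifs at hhi with hc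
      · have : (0 : Int) ≤ ((PySem.Int.toChars count).length : Int) := Int.natCast_nonneg _
        omega
      · simpa using hhi
  obtain ⟨chars1, hc1⟩ : ∃ c1, PySem.List.pySet? chars index char = some c1 := by
    cases hs : PySem.List.pySet? chars index char with
    | none => exact absurd h0 ((PySem.List.pySet?_eq_none_iff chars index char).mp hs)
    | some c1 => exact ⟨c1, rfl⟩
  have hlen1 := pySet?_length chars index char chars1 hc1
  rw [hc1]
  by_cases hc : count > 1
  · simp only [if_pos hc] at hhi ⊢
    have hsteps : pvDigitSteps count = (PySem.Int.toChars count).length :=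
      pvDigitSteps_toChars count hc
    -- A's side: the forward digit loop ends at index + 1 + len
    obtain ⟨l', _, hfold⟩ := digit_loop_snd (PySem.Int.toChars count) chars1 (index + 1) (by
      intro k hk
      rw [hlen1]
      unfold PySem.Raise.InRange
      constructor
      · omega
      · have : (k : Int) < ((PySem.Int.toChars count).length : Int) := by exact_mod_cast hk
        omega)
    rw [hfold]
    -- B's side: the back-to-front write loop succeeds
    obtain ⟨cs', hcs'⟩ := pvWriteBack_isSome count.toNat count le_rfl chars1
      (index + 1 + (pvDigitSteps count : Int)) (by
        intro k hk
        rw [hlen1, hsteps] at *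
        unfold PySem.Raise.InRange
        have hkl : (k : Int) < ((PySem.Int.toChars count).length : Int) := by
          exact_mod_cast hk
        constructor <;> omega)
    rw [hcs']
    simp [hsteps]
  · simp only [if_neg hc]
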